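-- pv_equiv track=rewrite | github.com/tjthejuggler/tail | habitdb_analyzer/habitdb_streak_finder.py | get_days_since_zero_minus
-- ===== SOURCE A (Python) =====
-- def get_days_since_zero_minus(inner_dict, target_date):
--     days_since_zero = None
--     sorted_dates = [d for d in inner_dict.keys() if d <= target_date]
--     sorted_dates.sort(reverse=True)
--     for index, date_str in enumerate(sorted_dates[1:]):
--         if inner_dict[date_str] == 0:
--             days_since_zero = index
--             break
--     if days_since_zero is None:
--         days_since_zero = len(sorted_dates)
--     return days_since_zero
-- ===== SOURCE B (Python) =====
-- def get_days_since_zero_minus(inner_dict, target_date):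
--     # No sort: max date, max zero date (excluding the max), count of dates above it.
--     m = None
--     n = 0
--     for d in inner_dict:
--         if d <= target_date:
--             n += 1
--             if m is None or d > m:
--                 m = d
--     if m is None:
--         return 0
--     z = None
--     for d, v in inner_dict.items():
--         if v == 0 and d <= target_date and d != m and (z is None or d > z):
--             z = d
--     if z is None:
--         return n
--     c = 0
--     for d in inner_dict:
--         if z < d <= target_date:
--             c += 1
--     return c - 1
-- ===== Notes on version B (the rewrite author's own statement) =====
-- stated objective: alternative
-- what changed: A filters the keys, sorts them in descending order and scans the tail for the first zero value; B never sorts: three linear passes compute the maximum date <= target, the maximum zero-valued date below it, and the count of dates above that zero date, from which the index follows.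
import Mathlib
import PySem

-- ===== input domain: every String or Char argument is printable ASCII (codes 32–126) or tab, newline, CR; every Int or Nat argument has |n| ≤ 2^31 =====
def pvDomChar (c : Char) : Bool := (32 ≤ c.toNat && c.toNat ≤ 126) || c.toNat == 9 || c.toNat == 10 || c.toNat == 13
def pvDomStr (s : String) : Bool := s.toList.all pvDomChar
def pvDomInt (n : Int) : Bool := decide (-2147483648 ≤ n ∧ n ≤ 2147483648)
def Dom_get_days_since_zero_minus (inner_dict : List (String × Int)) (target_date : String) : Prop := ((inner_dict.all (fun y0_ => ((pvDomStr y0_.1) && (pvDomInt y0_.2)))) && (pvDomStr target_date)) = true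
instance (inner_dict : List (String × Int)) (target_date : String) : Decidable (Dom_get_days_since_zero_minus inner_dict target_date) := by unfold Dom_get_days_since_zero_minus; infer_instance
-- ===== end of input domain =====

-- B replaces A's sort-then-scan by three linear passes (max date, max zero date below it, count): a different algorithm, no sort.
-- The dict argument is modelled as an association list; Pre_ states its keys are distinct (always true of a Python dict).

-- ===== PORT A =====
-- the 'for index, date_str in enumerate(sorted_dates[1:]): if inner_dict[date_str] == 0: …break' loop;
-- date_str always comes from inner_dict's own keys, so the lookup never raises (lookup = none is unreachable and falls through)
def pyLoopA (inner_dict : List (String × Int)) : List String → Int → Option Int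
  | [], _ => none
  | s :: rest, i => if inner_dict.lookup s = some 0 then some i else pyLoopA inner_dict rest (i + 1)

def get_days_since_zero_minus (inner_dict : List (String × Int)) (target_date : String) : Int :=
  let sorted_dates := PySem.List.sorted ((inner_dict.map Prod.fst).filter (fun d => decide (d ≤ target_date))) (fun x => x) true
  match pyLoopA inner_dict (sorted_dates.drop 1) 0 with  -- sorted_dates[1:]
  | some j => j
  | none => (sorted_dates.length : Int)

-- ===== PORT B =====
-- first loop of Source B: running max date ≤ target and count
def altPass1 (target_date : String) : List (String × Int) → Option String → Int → Option String × Int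
  | [], m, n => (m, n)
  | (d, _) :: rest, m, n =>
    if d ≤ target_date then
      altPass1 target_date rest
        (match m with | none => some d | some m' => if m' < d then some d else some m') (n + 1)
    else altPass1 target_date rest m n

-- second loop of Source B: max date with value 0, ≤ target, ≠ the max date
def altPass2 (target_date m : String) : List (String × Int) → Option String → Option String
  | [], z => z
  | (d, v) :: rest, z =>
    altPass2 target_date m rest
      (if v == 0 && decide (d ≤ target_date) && d != m && z.all (fun z' => decide (z' < d)) then some d else z)

-- third loop of Source B: count dates in (z, target]
def altPass3 (target_date z : String) : List (String × Int) → Int → Int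
  | [], c => c
  | (d, _) :: rest, c => altPass3 target_date z rest (if z < d ∧ d ≤ target_date then c + 1 else c)

def get_days_since_zero_minus_alt (inner_dict : List (String × Int)) (target_date : String) : Int :=
  match altPass1 target_date inner_dict none 0 with
  | (none, _) => 0
  | (some m, n) =>
    match altPass2 target_date m inner_dict none with
    | none => n
    | some z => altPass3 target_date z inner_dict 0 - 1

-- ===== PRECONDITION & SPEC =====
-- Pre_ excludes association lists with duplicate keys: they are not the image of any Python dict
-- (dict(...) collapses duplicates before either function runs), so the list-level behaviour there is unspecified.
def Pre_get_days_since_zero_minus (inner_dict : List (String × Int)) (target_date : String) : Prop :=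
  (inner_dict.map Prod.fst).Nodup
instance (inner_dict : List (String × Int)) (target_date : String) : Decidable (Pre_get_days_since_zero_minus inner_dict target_date) := by unfold Pre_get_days_since_zero_minus; infer_instance
def pvWitness_get_days_since_zero_minus : (List (String × Int)) × String :=
  ([("2024-01-01", 0), ("2024-01-02", 3)], "2024-01-03")

def Spec_get_days_since_zero_minus (inner_dict : List (String × Int)) (target_date : String) (out : Int) : Prop := out = get_days_since_zero_minus_alt inner_dict target_date
instance (inner_dict : List (String × Int)) (target_date : String) (out : Int) : Decidable (Spec_get_days_since_zero_minus inner_dict target_date out) := by unfold Spec_get_days_since_zero_minus; infer_instance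

-- ===== CLAIM (what is proved, stated in full; the proofs are below) =====
def Claim_equal_get_days_since_zero_minus : Prop := ∀ (inner_dict : List (String × Int)) (target_date : String), Dom_get_days_since_zero_minus inner_dict target_date → Pre_get_days_since_zero_minus inner_dict target_date → Spec_get_days_since_zero_minus inner_dict target_date (get_days_since_zero_minus inner_dict target_date)

-- ===== LEMMAS AND PROOFS =====

-- the accumulator step both pass1 and pass2 take: first-kept running maximum (proof-only helper)
def stepMax (m : Option String) (d : String) : Option String :=
  match m with | none => some d | some m' => if m' < d then some d else some m'

lemma pass1_spec (target_date : String) (xs : List (String × Int)) (m : Option String) (n : Int) :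
    altPass1 target_date xs m n =
      (((xs.map Prod.fst).filter (fun d => decide (d ≤ target_date))).foldl stepMax m,
       n + (((xs.map Prod.fst).filter (fun d => decide (d ≤ target_date))).length : Int)) := by
  induction xs generalizing m n with
  | nil => simp [altPass1]
  | cons p rest ih =>
    obtain ⟨d, v⟩ := p
    by_cases h : d ≤ target_date
    · simp only [altPass1, if_pos h, ih, List.map_cons, List.filter_cons, decide_eq_true_eq]
      simp only [if_pos h, List.foldl_cons, List.length_cons, stepMax, Prod.mk.injEq]
      exact ⟨trivial, by push_cast; ring⟩
    · simp only [altPass1, if_neg h, ih, List.map_cons, List.filter_cons, decide_eq_true_eq]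

lemma pass2_spec (target_date m : String) (xs : List (String × Int)) (z : Option String) :
    altPass2 target_date m xs z =
      ((xs.filter (fun p => decide (p.2 = 0 ∧ p.1 ≤ target_date ∧ p.1 ≠ m))).map Prod.fst).foldl stepMax z := by
  induction xs generalizing z with
  | nil => simp [altPass2]
  | cons p rest ih =>
    obtain ⟨d, v⟩ := p
    by_cases h : v = 0 ∧ d ≤ target_date ∧ d ≠ m
    · have hstep : (if v == 0 && decide (d ≤ target_date) && d != m && z.all (fun z' => decide (z' < d)) then some d else z) = stepMax z d := by
        cases z with
        | none => simp only [Option.all_none, Bool.and_true]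
                  rw [if_pos (by simp [h.1, h.2.1, h.2.2])]
                  rfl
        | some z' =>
          by_cases hlt : z' < d
          · rw [if_pos (by simp [h.1, h.2.1, h.2.2]; exact String.lt_iff_toList_lt.mp hlt)]
            simp only [stepMax]
            rw [if_pos hlt]
          · rw [if_neg (by simp; intro _ _ _; exact String.le_iff_toList_le.mp (not_lt.mp hlt))]
            simp only [stepMax]
            rw [if_neg hlt]
      rw [altPass2, hstep, ih, List.filter_cons]
      rw [if_pos (by simpa using h)]
      simp only [List.map_cons, List.foldl_cons]
    · have hstep : (if v == 0 && decide (d ≤ target_date) && d != m && z.all (fun z' => decide (z' < d)) then some d else z) = z := by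
        rcases not_and_or.mp h with h1 | h2
        · rw [if_neg (by simp [h1])]
        · rcases not_and_or.mp h2 with h3 | h4
          · rw [if_neg (by simp [h3])]
          · rw [if_neg (by simp [h4])]
      rw [altPass2, hstep, ih, List.filter_cons]
      rw [if_neg (by simpa using h)]

lemma pass3_spec (target_date z : String) (xs : List (String × Int)) (c : Int) :
    altPass3 target_date z xs c = c + (xs.countP (fun p => decide (z < p.1 ∧ p.1 ≤ target_date)) : Int) := by
  induction xs generalizing c with
  | nil => simp [altPass3]
  | cons p rest ih =>
    obtain ⟨d, v⟩ := p
    by_cases h : z < d ∧ d ≤ target_date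
    · rw [altPass3, if_pos h, ih, List.countP_cons]
      rw [if_pos (by simpa using h)]
      push_cast; ring
    · rw [altPass3, if_neg h, ih, List.countP_cons]
      rw [if_neg (by simpa using h)]
      push_cast; ring

lemma loopA_none (inner_dict : List (String × Int)) (xs : List String) (i : Int)
    (h : ∀ x ∈ xs, inner_dict.lookup x ≠ some 0) : pyLoopA inner_dict xs i = none := by
  induction xs generalizing i with
  | nil => rfl
  | cons x rest ih =>
    simp only [pyLoopA, if_neg (h x (List.mem_cons_self))]
    exact ih _ (fun y hy => h y (List.mem_cons_of_mem _ hy))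

lemma loopA_desc (inner_dict : List (String × Int)) (z : String)
    (hpz : inner_dict.lookup z = some 0) :
    ∀ (xs : List String) (i : Int), xs.Pairwise (fun a b => b < a) → z ∈ xs →
    (∀ y ∈ xs, inner_dict.lookup y = some 0 → y ≤ z) →
    pyLoopA inner_dict xs i = some (i + (xs.countP (fun x => decide (z < x)) : Int)) := by
  intro xs
  induction xs with
  | nil => intro i _ hz _; simp at hz
  | cons x rest ih =>
    intro i hpw hz hub
    have hrest : ∀ y ∈ rest, y < x := fun y hy => (List.pairwise_cons.mp hpw).1 y hy
    by_cases hx : inner_dict.lookup x = some 0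
    · have hxz : x ≤ z := hub x (List.mem_cons_self) hx
      have hzx : z = x := by
        rcases List.mem_cons.mp hz with rfl | hz'
        · rfl
        · exact absurd hxz (not_le.mpr (hrest z hz'))
      subst hzx
      have hcnt : (z :: rest).countP (fun x => decide (z < x)) = 0 := by
        rw [List.countP_eq_zero]
        intro y hy
        simp only [decide_eq_true_eq]
        rcases List.mem_cons.mp hy with rfl | hy'
        · exact lt_irrefl y
        · exact not_lt.mpr (le_of_lt (hrest y hy'))
      rw [pyLoopA, if_pos hx, hcnt]
      norm_num
    · have hzrest : z ∈ rest := by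
        rcases List.mem_cons.mp hz with rfl | hz'
        · exact absurd hpz hx
        · exact hz'
      have hxz : z < x := hrest z hzrest
      have hrec := ih (i + 1) (List.pairwise_cons.mp hpw).2 hzrest
        (fun y hy h0 => hub y (List.mem_cons_of_mem _ hy) h0)
      rw [pyLoopA, if_neg hx, hrec, List.countP_cons]
      rw [if_pos (by simpa using hxz)]
      congr 1
      push_cast
      ring

lemma lookup_eq_some_iff (xs : List (String × Int)) (hnd : (xs.map Prod.fst).Nodup)
    (k : String) (v : Int) : xs.lookup k = some v ↔ (k, v) ∈ xs := by
  induction xs with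
  | nil => simp
  | cons p rest ih =>
    obtain ⟨a, b⟩ := p
    simp only [List.map_cons, List.nodup_cons] at hnd
    rcases eq_or_ne k a with rfl | hk
    · have : (k == k) = true := by simp
      simp only [List.lookup, this]
      constructor
      · rintro h
        injection h with h
        subst h
        exact List.mem_cons_self
      · intro h
        rcases List.mem_cons.mp h with h' | h'
        · rw [(Prod.mk.injEq .. ▸ h' : k = k ∧ v = b).2]
        · exact absurd (List.mem_map_of_mem (f := Prod.fst) h') hnd.1
    · have : (k == a) = false := by simpa using hk
      simp only [List.lookup, this, ih hnd.2, List.mem_cons]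
      constructor
      · exact Or.inr
      · rintro (h | h)
        · exact absurd (congrArg Prod.fst h) hk
        · exact h

lemma foldMax_none_iff (l : List String) (m : Option String) :
    l.foldl stepMax m = none ↔ m = none ∧ l = [] := by
  induction l generalizing m with
  | nil => simp
  | cons d l ih =>
    simp only [List.foldl_cons, ih]
    constructor
    · rintro ⟨h, -⟩; cases m <;> simp [stepMax] at h <;> split at h <;> simp_all
    · rintro ⟨-, h⟩; simp at h

lemma foldMax_ub (l : List String) (m : Option String) (x : String)
    (h : l.foldl stepMax m = some x) : (∀ y, m = some y → y ≤ x) ∧ ∀ y ∈ l, y ≤ x := by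
  induction l generalizing m with
  | nil => simp_all
  | cons d l ih =>
    simp only [List.foldl_cons] at h
    obtain ⟨h1, h2⟩ := ih (stepMax m d) h
    have hd : d ≤ x := by
      cases m with
      | none => exact h1 d rfl
      | some m' =>
        by_cases hlt : m' < d
        · exact h1 d (by simp [stepMax, hlt])
        · exact le_trans (not_lt.mp hlt) (h1 m' (by simp [stepMax, hlt]))
    refine ⟨fun y hy => ?_, fun y hy => ?_⟩
    · subst hy
      by_cases hlt : y < d
      · exact le_trans (le_of_lt hlt) hd
      · exact h1 y (by simp [stepMax, hlt])
    · rcases List.mem_cons.mp hy with rfl | hy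
      · exact hd
      · exact h2 y hy

lemma foldMax_mem (l : List String) (m : Option String) (x : String)
    (h : l.foldl stepMax m = some x) : m = some x ∨ x ∈ l := by
  induction l generalizing m with
  | nil => simp_all
  | cons d l ih =>
    simp only [List.foldl_cons] at h
    rcases ih (stepMax m d) h with h' | h'
    · cases m with
      | none => simp [stepMax] at h'; simp [h']
      | some m' =>
        by_cases hlt : m' < d
        · simp [stepMax, hlt] at h'; simp [h']
        · simp [stepMax, hlt] at h'; simp [h']
    · simp [h']

lemma main_equiv (d : List (String × Int)) (t : String) (hnd : (d.map Prod.fst).Nodup) :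
    get_days_since_zero_minus d t = get_days_since_zero_minus_alt d t := by
  have hSnd : ((d.map Prod.fst).filter (fun s => decide (s ≤ t))).Nodup := hnd.filter _
  set S := (d.map Prod.fst).filter (fun s => decide (s ≤ t)) with hSdef
  set L := PySem.List.sorted S (fun x => x) true with hLdef
  have hperm : L.Perm S := PySem.List.sorted_perm S (fun x => x) true
  have hLnd : L.Nodup := (hperm.nodup_iff).mpr hSnd
  have hpwle : L.Pairwise (fun a b => b ≤ a) := PySem.List.sorted_pairwise_rev S (fun x => x)
  have hpw : L.Pairwise (fun a b => b < a) :=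
    (hpwle.and hLnd).imp (fun h => lt_of_le_of_ne h.1 (Ne.symm h.2))
  have hmemS : ∀ x, x ∈ S ↔ x ∈ d.map Prod.fst ∧ x ≤ t := by
    intro x; simp [hSdef, List.mem_filter]
  have hA : get_days_since_zero_minus d t =
      (match pyLoopA d (L.drop 1) 0 with
       | some j => j
       | none => (L.length : Int)) := rfl
  have hB : get_days_since_zero_minus_alt d t =
      (match (S.foldl stepMax none, (0 : Int) + (S.length : Int)) with
       | (none, _) => 0
       | (some m, n) =>
         match altPass2 t m d none with
         | none => n
         | some z => altPass3 t z d 0 - 1) := by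
    rw [get_days_since_zero_minus_alt, pass1_spec]
  rw [hA, hB]
  cases hM : S.foldl stepMax none with
  | none =>
    have hSnil : S = [] := ((foldMax_none_iff _ _).mp hM).2
    have hLnil : L = [] := by
      rw [hLdef, hSnil]; rfl
    simp [hLnil, pyLoopA]
  | some m0 =>
    have hm0S : m0 ∈ S := by
      rcases foldMax_mem _ _ _ hM with h | h
      · exact absurd h (by simp)
      · exact h
    have hub : ∀ y ∈ S, y ≤ m0 := (foldMax_ub _ _ _ hM).2
    cases hLc : L with
    | nil => exact absurd (hperm.symm.subset hm0S) (by simp [hLc])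
    | cons h0 tl =>
      have hh0ub : ∀ y ∈ S, y ≤ h0 := by
        intro y hy
        exact PySem.List.key_head_sorted_rev_ge S (fun x => x) (by rw [← hLdef]; exact hLc) y hy
      have h0S : h0 ∈ S := hperm.subset (by simp [hLc])
      have hm0h0 : m0 = h0 := le_antisymm (hh0ub m0 hm0S) (hub h0 h0S)
      subst hm0h0
      -- membership in tl
      have htl : ∀ x, x ∈ tl ↔ x ∈ S ∧ x ≠ m0 := by
        intro x
        constructor
        · intro hx
          refine ⟨hperm.subset (by simp [hLc, hx]), ?_⟩
          rintro rfl
          exact (List.nodup_cons.mp (hLc ▸ hLnd)).1 hx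
        · rintro ⟨hxS, hne⟩
          have := hperm.symm.subset hxS
          rw [hLc] at this
          rcases List.mem_cons.mp this with rfl | h
          · exact absurd rfl hne
          · exact h
      -- candidates of pass2
      have hC : ∀ x, x ∈ ((d.filter (fun p => decide (p.2 = 0 ∧ p.1 ≤ t ∧ p.1 ≠ m0))).map Prod.fst) ↔
          (x ∈ tl ∧ d.lookup x = some 0) := by
        intro x
        rw [List.mem_map]
        constructor
        · rintro ⟨⟨x', v'⟩, hmem, rfl⟩
          rw [List.mem_filter] at hmem
          obtain ⟨hmemd, hq⟩ := hmem
          simp only [decide_eq_true_eq] at hq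
          obtain ⟨rfl, hle, hne⟩ := hq
          have hlook : d.lookup x' = some 0 := (lookup_eq_some_iff d hnd x' 0).mpr hmemd
          refine ⟨(htl x').mpr ⟨(hmemS x').mpr ⟨List.mem_map_of_mem (f := Prod.fst) hmemd, hle⟩, hne⟩, hlook⟩
        · rintro ⟨hxtl, hlook⟩
          obtain ⟨hxS, hne⟩ := (htl x).mp hxtl
          refine ⟨(x, 0), ?_, rfl⟩
          rw [List.mem_filter]
          refine ⟨(lookup_eq_some_iff d hnd x 0).mp hlook, ?_⟩
          simp only [decide_eq_true_eq]
          exact ⟨trivial, ((hmemS x).mp hxS).2, hne⟩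
      simp only [hLc, List.drop_succ_cons, List.drop_zero]
      rw [pass2_spec]
      cases hZ : ((d.filter (fun p => decide (p.2 = 0 ∧ p.1 ≤ t ∧ p.1 ≠ m0))).map Prod.fst).foldl stepMax none with
      | none =>
        have hCnil := ((foldMax_none_iff _ _).mp hZ).2
        have hnone : pyLoopA d tl 0 = none := by
          apply loopA_none
          intro x hx hlook
          have : x ∈ ((d.filter (fun p => decide (p.2 = 0 ∧ p.1 ≤ t ∧ p.1 ≠ m0))).map Prod.fst) :=
            (hC x).mpr ⟨hx, hlook⟩
          rw [hCnil] at this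
          simp at this
        rw [hnone]
        have : L.length = S.length := hperm.length_eq
        simp [← hLc, this]
      | some z =>
        have hzC : z ∈ ((d.filter (fun p => decide (p.2 = 0 ∧ p.1 ≤ t ∧ p.1 ≠ m0))).map Prod.fst) := by
          rcases foldMax_mem _ _ _ hZ with h | h
          · exact absurd h (by simp)
          · exact h
        have hubC := (foldMax_ub _ _ _ hZ).2
        obtain ⟨hztl, hzlook⟩ := (hC z).mp hzC
        have hloop : pyLoopA d tl 0 = some ((0 : Int) + (tl.countP (fun x => decide (z < x)) : Int)) := by
          apply loopA_desc d z hzlook tl 0 (List.pairwise_cons.mp (hLc ▸ hpw)).2 hztl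
          intro y hy h0
          exact hubC y ((hC y).mpr ⟨hy, h0⟩)
        -- count bookkeeping
        have hcount : d.countP (fun p => decide (z < p.1 ∧ p.1 ≤ t)) = S.countP (fun x => decide (z < x)) := by
          rw [hSdef, List.countP_filter, List.countP_map]
          apply List.countP_congr
          intro p _
          simp [Function.comp]
        have hzm0 : z < m0 := (List.pairwise_cons.mp (hLc ▸ hpw)).1 z hztl
        have hSL : S.countP (fun x => decide (z < x)) = tl.countP (fun x => decide (z < x)) + 1 := by
          rw [← hperm.countP_eq, hLc, List.countP_cons]
          simp [hzm0]
        simp only [hloop, pass3_spec, hcount, hSL]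
        push_cast
        ring

-- ===== VERDICT (by name: the statement is the Claim_ definition above) =====
theorem get_days_since_zero_minus_spec : Claim_equal_get_days_since_zero_minus := by
  intro inner_dict target_date _ hnd
  show get_days_since_zero_minus inner_dict target_date = get_days_since_zero_minus_alt inner_dict target_date
  exact main_equiv inner_dict target_date hnd
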